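-- pv_equiv track=rewrite | github.com/vivisect/dissect | dissect/formats/fat32.py | _gen83Name
-- ===== SOURCE A (Python) =====
-- DIR_NAME_SIZE = 11
--
-- ILLEGAL_83_CHARS = ''.join([chr(c) for c in range(0x20) if c != 0x5]) + \
--         '\x22\x2A\x2B\x2C\x2E\x2F\x3A\x3B\x3C\x3D\x3E\x3F\x5B\x5C\x5D\x7C'
--
-- def _gen83Name(full_name, hint=None):
--     '''
--     format a name, and optionally a hint, using a modified 8.3 short
--      filename generation algorithm.
--     there is no standardized algorithm, so we have some leeway.
--     but, its nice to be similar to existing drivers.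
--     inspired by: https://en.wikipedia.org/wiki/8.3_filename
--
--
--     param full_name: the long name from which to generate the 8.3 name
--     type full_name: unicode
--
--     param hint: a suggested postfix number that probably won't conflict
--      with other names in the directory
--     type hint: int
--
--     rtype: str
--     '''
--     if full_name in ('.', '..'):
--         return full_name.ljust(DIR_NAME_SIZE, ' ')
--
--     full_name = full_name.lstrip('.')
--
--     if '.' in full_name:
--         name, _, ext = full_name.rpartition('.')
--     else:
--         name = full_name
--         ext = ''
--
--     for char in ILLEGAL_83_CHARS:
--         # yeah this is not fast. but it should be fast enough.
--         name = name.replace(char, '')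
--
--     # truncate the extension, upper case it, and right pad it with spaces
--     ext = ext[:3].upper().ljust(3, ' ')
--
--     if len(name) > 8 or hint is not None:
--         # inspired by: https://en.wikipedia.org/wiki/8.3_filename
--         # if name is too long (or there's a conflict we need to resolve),
--         # take (about) the first six characters, then tilde, then a number
--         # finally, uppercase, and right pad with spaces
--         shint = str(hint or 0)
--         name = (name[:7 - len(shint)] + '~' + shint).upper().ljust(8, ' ')
--     else:
--         # names with 8 or less characters are uppercased and right padded with spaces
--         name = name.upper().ljust(8, ' ')
--
--     return name + ext
-- ===== SOURCE B (Python) =====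
-- DIR_NAME_SIZE = 11
--
-- ILLEGAL_83_CHARS = ''.join([chr(c) for c in range(0x20) if c != 0x5]) + \
--         '\x22\x2A\x2B\x2C\x2E\x2F\x3A\x3B\x3C\x3D\x3E\x3F\x5B\x5C\x5D\x7C'
--
-- ILLEGAL_83_SET = frozenset(ILLEGAL_83_CHARS)
--
--
-- def _pad(s, n):
--     return s + ' ' * (n - len(s))
--
--
-- def _gen83Name(full_name, hint=None):
--     if full_name in ('.', '..'):
--         return _pad(full_name, DIR_NAME_SIZE)
--
--     stem, dot, ext = full_name.lstrip('.').rpartition('.')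
--     if not dot:
--         stem, ext = ext, ''
--
--     # one left-to-right pass over stem instead of one rescan per illegal char
--     stem = ''.join(c for c in stem if c not in ILLEGAL_83_SET)
--
--     if len(stem) > 8 or hint is not None:
--         tail = '~' + str(0 if hint is None else hint)
--         stem = stem[:8 - len(tail)] + tail
--
--     # uppercase and right-pad both fields once, at the end
--     return _pad(stem.upper(), 8) + _pad(ext[:3].upper(), 3)
-- ===== Notes on version B (the rewrite author's own statement) =====
-- stated objective: idiomatic
-- what changed: B removes illegal characters in one left-to-right pass over the name using a frozenset built once (instead of A's loop over the 47 illegal characters, each doing a full replace rescan of the name), splits with an unconditional rpartition instead of a membership test plus rpartition, and hoists the uppercase/right-pad formatting of both fields out of the branches into one final expression via a shared _pad helper.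
import Mathlib
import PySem

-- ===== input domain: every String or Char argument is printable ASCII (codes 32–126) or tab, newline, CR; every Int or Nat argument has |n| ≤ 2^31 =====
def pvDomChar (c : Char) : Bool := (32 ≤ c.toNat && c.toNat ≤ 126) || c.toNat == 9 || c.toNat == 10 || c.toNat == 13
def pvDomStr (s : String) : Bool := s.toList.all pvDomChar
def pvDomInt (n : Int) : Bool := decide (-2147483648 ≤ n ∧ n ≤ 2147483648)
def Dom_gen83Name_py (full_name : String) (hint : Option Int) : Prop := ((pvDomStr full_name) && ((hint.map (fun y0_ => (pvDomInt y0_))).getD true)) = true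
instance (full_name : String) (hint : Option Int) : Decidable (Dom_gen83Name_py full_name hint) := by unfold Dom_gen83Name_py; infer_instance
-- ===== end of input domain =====

-- B removes the illegal characters in ONE pass over the name using a set built once
-- (instead of A's per-illegal-char replace rescans) and hoists the uppercase/pad
-- formatting out of the branches; same return value (idiomatic objective).

-- ===== PORT A =====

-- module constant ILLEGAL_83_CHARS (as a list of chars)
def ILLEGAL_83_CHARS : List Char :=
  ((List.range 32).filter (fun c => c ≠ 5)).map Char.ofNat ++
    ['\x22', '*', '+', ',', '.', '/', ':', ';', '<', '=', '>', '?', '[', '\\', ']', '|']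

def gen83Name_py (full_name : String) (hint : Option Int) : String :=
  if full_name = "." ∨ full_name = ".." then
    -- full_name.ljust(11, ' ') (hand port, exact: append pad spaces on the right)
    String.mk (full_name.toList ++ List.replicate (11 - full_name.toList.length) ' ')
  else
    -- full_name.lstrip('.') (hand port, exact for a single strip character)
    let fl := full_name.toList.dropWhile (fun c => c == '.')
    let p :=
      if PySem.Chars.isIn ['.'] fl then
        -- full_name.rpartition('.') (hand port via rfind, exact: '.' occurs in fl here)
        let i := (PySem.Chars.rfind fl ['.']).toNat
        (fl.take i, fl.drop (i + 1))
      else (fl, ([] : List Char))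
    let name := ILLEGAL_83_CHARS.foldl (fun nm ch => PySem.Chars.replace nm [ch] []) p.1
    let ext0 := PySem.Chars.upper (PySem.List.slice p.2 none (some (3 : Int)))
    let ext := ext0 ++ List.replicate (3 - ext0.length) ' '
    let name' :=
      if 8 < name.length ∨ hint.isSome then
        let shint := PySem.Int.toChars (hint.getD 0)  -- str(hint or 0)
        let nm := PySem.Chars.upper
          (PySem.List.slice name none (some ((7 : Int) - (shint.length : Int))) ++ '~' :: shint)
        nm ++ List.replicate (8 - nm.length) ' '
      else
        let nm := PySem.Chars.upper name
        nm ++ List.replicate (8 - nm.length) ' '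
    String.mk (name' ++ ext)

-- ===== PORT B =====

def ILLEGAL_83_SET : PySem.Set Char := PySem.Set.ofList ILLEGAL_83_CHARS

def pvPad (cs : List Char) (n : Nat) : List Char := cs ++ List.replicate (n - cs.length) ' '

def gen83Name_py_alt (full_name : String) (hint : Option Int) : String :=
  if full_name = "." ∨ full_name = ".." then
    String.mk (pvPad full_name.toList 11)
  else
    -- lstrip('.') (hand port, exact for a single strip character)
    let s := full_name.toList.dropWhile (fun c => c == '.')
    -- rpartition('.') (hand port via rfind; rfind = -1 means separator absent)
    let i := PySem.Chars.rfind s ['.']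
    let p := if i = -1 then (s, ([] : List Char)) else (s.take i.toNat, s.drop (i.toNat + 1))
    let stem := p.1.filter (fun c => !(PySem.Set.contains ILLEGAL_83_SET c))
    let stem' :=
      if 8 < stem.length ∨ hint.isSome then
        let tail := '~' :: PySem.Int.toChars (match hint with | none => 0 | some h => h)
        PySem.List.slice stem none (some ((8 : Int) - (tail.length : Int))) ++ tail
      else stem
    String.mk (pvPad (PySem.Chars.upper stem') 8 ++
               pvPad (PySem.Chars.upper (PySem.List.slice p.2 none (some (3 : Int)))) 3)

-- ===== PRECONDITION & SPEC =====
def Spec_gen83Name_py (full_name : String) (hint : Option Int) (out : String) : Prop := out = gen83Name_py_alt full_name hint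
instance (full_name : String) (hint : Option Int) (out : String) : Decidable (Spec_gen83Name_py full_name hint out) := by unfold Spec_gen83Name_py; infer_instance

-- ===== CLAIM (what is proved, stated in full; the proofs are below) =====
def Claim_equal_gen83Name_py : Prop := ∀ (full_name : String) (hint : Option Int), Dom_gen83Name_py full_name hint → Spec_gen83Name_py full_name hint (gen83Name_py full_name hint)

-- ===== LEMMAS AND PROOFS =====

-- replace by one char with '' is a filter
theorem replace_go_filter (c : Char) (fuel : Nat) :
    ∀ (l acc : List Char), l.length ≤ fuel →
      PySem.Chars.replace.go [c] [] fuel l acc = acc.reverse ++ l.filter (fun x => !(x == c)) := by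
  induction fuel with
  | zero =>
    intro l acc h
    have : l = [] := List.length_eq_zero_iff.mp (Nat.le_zero.mp h)
    subst this
    simp [PySem.Chars.replace.go]
  | succ n ih =>
    intro l acc h
    cases l with
    | nil => simp [PySem.Chars.replace.go]
    | cons a t =>
      by_cases hac : a = c
      · subst hac
        have hpre : List.isPrefixOf [a] (a :: t) = true := by simp [List.isPrefixOf]
        simp only [PySem.Chars.replace.go, hpre, if_pos]
        rw [show List.drop [a].length (a :: t) = t from rfl]
        rw [ih t ([].reverse ++ acc) (by simpa using Nat.succ_le_succ_iff.mp h)]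
        simp
      · have hpre : List.isPrefixOf [c] (a :: t) = false := by
          simp [List.isPrefixOf]
          exact fun hh => (hac hh.symm).elim
        simp only [PySem.Chars.replace.go, hpre]
        rw [ih t (a :: acc) (by simpa using Nat.succ_le_succ_iff.mp h)]
        simp [hac]

theorem replace_one_empty (c : Char) (s : List Char) :
    PySem.Chars.replace s [c] [] = s.filter (fun x => !(x == c)) := by
  have := replace_go_filter c s.length s [] le_rfl
  simpa [PySem.Chars.replace] using this

theorem foldl_replace_filter (cs : List Char) (s : List Char) :
    cs.foldl (fun nm ch => PySem.Chars.replace nm [ch] []) s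
      = s.filter (fun x => !(cs.contains x)) := by
  induction cs generalizing s with
  | nil => simp
  | cons c t ih =>
    rw [List.foldl_cons, replace_one_empty, ih, List.filter_filter]
    congr 1
    funext x
    simp only [List.contains_cons, Bool.not_or]
    cases h1 : decide (x ∈ t) <;> cases h2 : decide (x = c) <;> simp_all

-- rfind returns -1 exactly when the one-char needle is absent
theorem rfind_go_eq_neg_one_iff (s sub : List Char) (n : Nat) :
    PySem.Chars.rfind.go s sub n = -1 ↔ ∀ j ≤ n, ¬ (sub.isPrefixOf (s.drop j) = true) := by
  induction n with
  | zero =>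
    simp only [PySem.Chars.rfind.go]
    constructor
    · intro h j hj
      interval_cases j
      by_cases hp : sub.isPrefixOf s = true
      · simp [hp] at h
      · simpa using hp
    · intro h
      have := h 0 le_rfl
      simp at this
      simp [this]
  | succ m ih =>
    simp only [PySem.Chars.rfind.go]
    by_cases hp : sub.isPrefixOf (s.drop (m + 1)) = true
    · rw [if_pos hp]
      constructor
      · intro h; exact absurd h (by omega)
      · intro h; exact absurd hp (h (m + 1) le_rfl)
    · rw [if_neg hp, ih]
      constructor
      · intro h j hj
        by_cases hjm : j ≤ m
        · exact h j hjm
        · have : j = m + 1 := by omega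
          subst this; exact hp
      · intro h j hj
        exact h j (Nat.le_succ_of_le hj)

theorem rfind_eq_neg_one_iff_not_isIn (s : List Char) (c : Char) :
    PySem.Chars.rfind s [c] = -1 ↔ PySem.Chars.isIn [c] s = false := by
  rw [PySem.Chars.rfind, rfind_go_eq_neg_one_iff]
  rw [← Bool.not_eq_true, ← PySem.Chars.exists_prefix_drop_iff_isIn]
  constructor
  · rintro h ⟨j, hj⟩
    by_cases hjl : j ≤ s.length
    · exact h j hjl (by simpa [List.IsPrefix] using (List.isPrefixOf_iff_prefix).mpr hj) 
    · have : s.drop j = [] := List.drop_eq_nil_of_le (by omega)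
      rw [this] at hj
      simp [List.prefix_nil] at hj
  · intro h j _ hpre
    exact h ⟨j, List.isPrefixOf_iff_prefix.mp hpre⟩

theorem set_contains_eq (c : Char) :
    PySem.Set.contains ILLEGAL_83_SET c = ILLEGAL_83_CHARS.contains c := by
  unfold ILLEGAL_83_SET
  by_cases h : c ∈ ILLEGAL_83_CHARS
  · rw [(PySem.Set.contains_iff _ _).mpr ((PySem.Set.mem_ofList _ _).mpr h)]
    simp [h]
  · have h2 : ¬ (PySem.Set.ofList ILLEGAL_83_CHARS).contains c = true :=
      fun hh => h ((PySem.Set.mem_ofList _ _).mp ((PySem.Set.contains_iff _ _).mp hh))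
    rw [Bool.not_eq_true] at h2
    rw [h2]
    simp [h]

theorem split_if_eq (fl : List Char) :
    (if PySem.Chars.isIn ['.'] fl then
        ((fl.take (PySem.Chars.rfind fl ['.']).toNat,
          fl.drop ((PySem.Chars.rfind fl ['.']).toNat + 1)) : List Char × List Char)
      else (fl, [])) =
    (if PySem.Chars.rfind fl ['.'] = -1 then ((fl, []) : List Char × List Char)
      else (fl.take (PySem.Chars.rfind fl ['.']).toNat,
            fl.drop ((PySem.Chars.rfind fl ['.']).toNat + 1))) := by
  by_cases hin : PySem.Chars.isIn ['.'] fl = true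
  · rw [if_pos hin, if_neg]
    intro hm
    rw [rfind_eq_neg_one_iff_not_isIn] at hm
    rw [hin] at hm
    exact Bool.true_eq_false.mp hm
  · have hf : PySem.Chars.isIn ['.'] fl = false := by simpa using hin
    rw [if_neg hin, if_pos ((rfind_eq_neg_one_iff_not_isIn fl '.').mpr hf)]

-- ===== VERDICT (by name: the statement is the Claim_ definition above) =====
theorem gen83Name_py_spec : Claim_equal_gen83Name_py := by
  intro fn hint _
  unfold Spec_gen83Name_py gen83Name_py gen83Name_py_alt pvPad
  by_cases h0 : fn = "." ∨ fn = ".."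
  · rw [if_pos h0, if_pos h0]
  · rw [if_neg h0, if_neg h0]
    simp only [foldl_replace_filter, set_contains_eq, split_if_eq, List.length_cons]
    cases hint with
    | none =>
      simp only [Option.isSome_none, Option.getD_none, Nat.cast_add, Nat.cast_one,
        show ∀ n : ℤ, (8 : ℤ) - (n + 1) = 7 - n from fun n => by ring]
      split_ifs <;> rfl
    | some h =>
      simp only [Option.isSome_some, Option.getD_some, Nat.cast_add, Nat.cast_one,
        show ∀ n : ℤ, (8 : ℤ) - (n + 1) = 7 - n from fun n => by ring]
      split_ifs <;> rfl
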